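-- pv_equiv track=rewrite | github.com/eliannaqk/mdk | 05_convert_to_nanobody.py | extract_cdr_like_regions
-- ===== SOURCE A (Python) =====
-- def extract_cdr_like_regions(design_sequence, paratope_positions):
--     """
--     Extract CDR-like regions from the designed binder
--     These will be grafted onto the nanobody scaffold
--     """
--
--     # Identify continuous stretches of paratope residues
--     # These will become our CDR replacements
--
--     cdrs = []
--     current_cdr = []
--
--     for i in range(len(design_sequence)):
--         if i in paratope_positions:
--             current_cdr.append(i)
--         elif current_cdr:
--             if len(current_cdr) >= 3:  # Minimum CDR length
--                 cdrs.append({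
--                     'start': current_cdr[0],
--                     'end': current_cdr[-1],
--                     'sequence': design_sequence[current_cdr[0]:current_cdr[-1]+1]
--                 })
--             current_cdr = []
--
--     # Handle last CDR if exists
--     if current_cdr and len(current_cdr) >= 3:
--         cdrs.append({
--             'start': current_cdr[0],
--             'end': current_cdr[-1],
--             'sequence': design_sequence[current_cdr[0]:current_cdr[-1]+1]
--         })
--
--     # Map to canonical CDRs (simplified mapping)
--     cdr_mapping = {}
--     if len(cdrs) >= 1:
--         cdr_mapping['CDR1'] = cdrs[0]['sequence']
--     if len(cdrs) >= 2:
--         cdr_mapping['CDR2'] = cdrs[1]['sequence']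
--     if len(cdrs) >= 3:
--         cdr_mapping['CDR3'] = cdrs[2]['sequence']
--
--     # Use default CDRs for any missing
--     default_cdrs = {
--         'CDR1': 'GFTFS',
--         'CDR2': 'IS',
--         'CDR3': 'AR'
--     }
--
--     for cdr_name in ['CDR1', 'CDR2', 'CDR3']:
--         if cdr_name not in cdr_mapping:
--             cdr_mapping[cdr_name] = default_cdrs[cdr_name]
--
--     return cdr_mapping
-- ===== SOURCE B (Python) =====
-- def extract_cdr_like_regions(design_sequence, paratope_positions):
--     """
--     Extract CDR-like regions from the designed binder
--     These will be grafted onto the nanobody scaffold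
--     """
--     n = len(design_sequence)
--     positions = sorted({p for p in paratope_positions if 0 <= p < n})
--
--     # Group the sorted in-bounds positions into maximal runs of consecutive integers
--     runs = []
--     run = []
--     for p in positions:
--         if run and p == run[-1] + 1:
--             run.append(p)
--         else:
--             if run:
--                 runs.append(run)
--             run = [p]
--     if run:
--         runs.append(run)
--
--     # Runs of length >= 3 become CDR segments, first three map to CDR1..CDR3
--     segs = [design_sequence[r[0]:r[-1] + 1] for r in runs if len(r) >= 3]
--     defaults = ['GFTFS', 'IS', 'AR']
--     return {name: (segs[i] if i < len(segs) else defaults[i])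
--             for i, name in enumerate(['CDR1', 'CDR2', 'CDR3'])}
-- ===== Notes on version B (the rewrite author's own statement) =====
-- stated objective: alternative
-- what changed: Instead of scanning every index of the sequence and testing membership in paratope_positions, B sorts the distinct in-bounds positions, groups maximal consecutive runs in one pass over them, and fills CDR1-3 from the first three long runs via a comprehension.
import Mathlib
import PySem

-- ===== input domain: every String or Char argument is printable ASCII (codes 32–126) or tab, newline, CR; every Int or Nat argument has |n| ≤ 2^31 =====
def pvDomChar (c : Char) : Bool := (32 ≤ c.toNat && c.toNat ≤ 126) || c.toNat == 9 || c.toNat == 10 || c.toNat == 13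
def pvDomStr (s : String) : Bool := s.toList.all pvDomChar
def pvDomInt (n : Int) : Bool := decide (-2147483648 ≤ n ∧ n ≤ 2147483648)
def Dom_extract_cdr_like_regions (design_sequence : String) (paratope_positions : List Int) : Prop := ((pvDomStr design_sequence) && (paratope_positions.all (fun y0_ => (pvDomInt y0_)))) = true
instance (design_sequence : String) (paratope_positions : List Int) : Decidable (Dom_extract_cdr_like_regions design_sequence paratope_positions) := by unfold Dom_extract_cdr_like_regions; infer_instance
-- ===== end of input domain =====

-- B replaces A's per-index scan of the whole sequence with a sorted-distinct-positions
-- grouping of the paratope positions themselves (objective: alternative decomposition).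

-- ===== PORT A =====
-- a CDR record {'start','end','sequence'}; the default triple is only read behind the
-- length guards, exactly as Python's cdrs[0]/[1]/[2] are.
def pvMkTriple (ds : String) (cur : List Nat) : Nat × Nat × String :=
  (cur.headD 0, cur.getLastD 0,
   PySem.Str.slice ds (some ((cur.headD 0 : Nat) : Int)) (some (((cur.getLastD 0 : Nat) : Int) + 1)))

def pvAStep (ds : String) (pp : List Int) (st : List (Nat × Nat × String) × List Nat) (i : Nat) :
    List (Nat × Nat × String) × List Nat :=
  if ((i : Int) ∈ pp) then (st.1, st.2 ++ [i])
  else if st.2 ≠ [] then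
    ((if 3 ≤ st.2.length then st.1 ++ [pvMkTriple ds st.2] else st.1), [])
  else st

-- the cdr_mapping / default-filling tail of A
def pvAFinish (cdrs : List (Nat × Nat × String)) : List (String × String) :=
  let m0 : PySem.Dict String String := PySem.Dict.empty
  let m1 := if 1 ≤ cdrs.length then m0.insert "CDR1" (cdrs.getD 0 (0, 0, "")).2.2 else m0
  let m2 := if 2 ≤ cdrs.length then m1.insert "CDR2" (cdrs.getD 1 (0, 0, "")).2.2 else m1
  let m3 := if 3 ≤ cdrs.length then m2.insert "CDR3" (cdrs.getD 2 (0, 0, "")).2.2 else m2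
  let dflt : PySem.Dict String String := PySem.Dict.ofList [("CDR1", "GFTFS"), ("CDR2", "IS"), ("CDR3", "AR")]
  let m4 := (["CDR1", "CDR2", "CDR3"]).foldl
      (fun m name => if m.contains name then m else m.insert name (dflt.getD name "")) m3
  m4.items

def extract_cdr_like_regions (design_sequence : String) (paratope_positions : List Int) :
    List (String × String) :=
  let st := (List.range design_sequence.toList.length).foldl
      (pvAStep design_sequence paratope_positions) ([], [])
  let cdrs := if st.2 ≠ [] ∧ 3 ≤ st.2.length then st.1 ++ [pvMkTriple design_sequence st.2] else st.1
  pvAFinish cdrs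

-- ===== PORT B =====
def pvBStep (st : List (List Int) × List Int) (p : Int) : List (List Int) × List Int :=
  if st.2 ≠ [] ∧ p = st.2.getLastD 0 + 1 then (st.1, st.2 ++ [p])
  else ((if st.2 ≠ [] then st.1 ++ [st.2] else st.1), [p])

-- the dict-comprehension tail of B
def pvBFinish (segs : List String) : List (String × String) :=
  (PySem.List.enumerate ["CDR1", "CDR2", "CDR3"] 0).map
    (fun q => (q.2, if q.1 < (segs.length : Int) then PySem.List.pyGetD segs q.1 ""
                    else PySem.List.pyGetD ["GFTFS", "IS", "AR"] q.1 ""))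

def extract_cdr_like_regions_alt (design_sequence : String) (paratope_positions : List Int) :
    List (String × String) :=
  let n : Int := (design_sequence.toList.length : Int)
  let positions := PySem.List.sorted
      (PySem.Set.ofList (paratope_positions.filter (fun p => decide (0 ≤ p) && decide (p < n))))
      (fun x => x) false
  let st := positions.foldl pvBStep ([], [])
  let runs := if st.2 ≠ [] then st.1 ++ [st.2] else st.1
  let segs := (runs.filter (fun r => 3 ≤ r.length)).map
      (fun r => PySem.Str.slice design_sequence (some (r.headD 0)) (some (r.getLastD 0 + 1)))
  pvBFinish segs

-- ===== PRECONDITION & SPEC =====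
def Spec_extract_cdr_like_regions (design_sequence : String) (paratope_positions : List Int) (out : List (String × String)) : Prop := out = extract_cdr_like_regions_alt design_sequence paratope_positions
instance (design_sequence : String) (paratope_positions : List Int) (out : List (String × String)) : Decidable (Spec_extract_cdr_like_regions design_sequence paratope_positions out) := by unfold Spec_extract_cdr_like_regions; infer_instance

-- ===== CLAIM (what is proved, stated in full; the proofs are below) =====
def Claim_equal_extract_cdr_like_regions : Prop := ∀ (design_sequence : String) (paratope_positions : List Int), Dom_extract_cdr_like_regions design_sequence paratope_positions → Spec_extract_cdr_like_regions design_sequence paratope_positions (extract_cdr_like_regions design_sequence paratope_positions)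

-- ===== LEMMAS AND PROOFS =====

-- run-grouping of the second argument, continuing the pending run `run`
def pvRuns {α : Type} [Zero α] [Add α] [One α] [DecidableEq α] : List α → List α → List (List α)
  | run, [] => if run = [] then [] else [run]
  | run, q :: rest =>
      if run ≠ [] ∧ q = run.getLastD 0 + 1 then pvRuns (run ++ [q]) rest
      else if run = [] then pvRuns [q] rest else run :: pvRuns [q] rest

def pvBig (ds : String) (rs : List (List Nat)) : List (Nat × Nat × String) :=
  (rs.filter (fun r => 3 ≤ r.length)).map (pvMkTriple ds)

def pvBFlush (st : List (List Int) × List Int) : List (List Int) :=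
  if st.2 ≠ [] then st.1 ++ [st.2] else st.1

def pvAFlush (ds : String) (st : List (Nat × Nat × String) × List Nat) : List (Nat × Nat × String) :=
  if st.2 ≠ [] ∧ 3 ≤ st.2.length then st.1 ++ [pvMkTriple ds st.2] else st.1

lemma pvGetLastD_map_cast (l : List Nat) :
    (l.map (fun i : Nat => (i : Int))).getLastD 0 = ((l.getLastD 0 : Nat) : Int) := by
  simp only [List.getLastD_eq_getLast?, List.getLast?_map]
  cases l.getLast? <;> simp

lemma pvRuns_cast (F : List Nat) : ∀ run : List Nat,
    pvRuns (run.map (fun i : Nat => (i : Int))) (F.map (fun i : Nat => (i : Int)))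
      = (pvRuns run F).map (List.map (fun i : Nat => (i : Int))) := by
  induction F with
  | nil =>
    intro run
    by_cases h : run = [] <;> simp [pvRuns, h]
  | cons q rest ih =>
    intro run
    by_cases h0 : run = []
    · subst h0
      simp only [List.map_cons, List.map_nil]
      rw [show pvRuns ([] : List Int) ((q : Int) :: rest.map (fun i : Nat => (i : Int)))
            = pvRuns [(q : Int)] (rest.map (fun i : Nat => (i : Int))) from by simp [pvRuns],
          show pvRuns ([] : List Nat) (q :: rest) = pvRuns [q] rest from by simp [pvRuns]]
      simpa using ih [q]
    · have hc : run.map (fun i : Nat => (i : Int)) ≠ [] := by simpa using h0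
      have hlast := pvGetLastD_map_cast run
      simp only [List.map_cons, pvRuns]
      by_cases h2 : q = run.getLastD 0 + 1
      · have h2' : (q : Int) = (run.map (fun i : Nat => (i : Int))).getLastD 0 + 1 := by
          rw [hlast]; exact_mod_cast h2
        rw [if_pos ⟨hc, h2'⟩, if_pos ⟨h0, h2⟩]
        have := ih (run ++ [q])
        simpa using this
      · have h2' : ¬ (q : Int) = (run.map (fun i : Nat => (i : Int))).getLastD 0 + 1 := by
          rw [hlast]; intro hx; exact h2 (by exact_mod_cast hx)
        rw [if_neg (fun hh => h2' hh.2), if_neg hc, if_neg (fun hh => h2 hh.2), if_neg h0]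
        simpa using ih [q]

lemma pvBLoop (P : List Int) : ∀ runs run,
    pvBFlush (P.foldl pvBStep (runs, run)) = runs ++ pvRuns run P := by
  induction P with
  | nil =>
    intro runs run
    by_cases h : run = [] <;> simp [pvBFlush, pvRuns, h]
  | cons p rest ih =>
    intro runs run
    simp only [List.foldl_cons, pvBStep, pvRuns]
    by_cases h : run ≠ [] ∧ p = run.getLastD 0 + 1
    · rw [if_pos h, if_pos h]
      exact ih runs (run ++ [p])
    · rw [if_neg h, if_neg h]
      by_cases h0 : run = []
      · subst h0
        rw [if_pos rfl]
        simpa using ih runs [p]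
      · rw [if_neg h0, if_pos h0, ih (runs ++ [run]) [p]]
        simp

lemma pvRuns_break (run F : List Nat) (hrun : run ≠ [])
    (h : ∀ q ∈ F, run.getLastD 0 + 1 ≠ q) :
    pvRuns run F = run :: pvRuns [] F := by
  cases F with
  | nil => simp [pvRuns, hrun]
  | cons q rest =>
    have hq : ¬ (run ≠ [] ∧ q = run.getLastD 0 + 1) := by
      rintro ⟨-, hq⟩; exact h q (List.mem_cons_self) hq.symm
    simp only [pvRuns]
    rw [if_neg hq, if_neg hrun]
    simp

lemma pvALoop (ds : String) (pp : List Int) : ∀ (m a : Nat) (cdrs : List (Nat × Nat × String)) (run : List Nat),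
    (run ≠ [] → run.getLastD 0 + 1 = a) →
    pvAFlush ds ((List.range' a m).foldl (pvAStep ds pp) (cdrs, run))
      = cdrs ++ pvBig ds (pvRuns run ((List.range' a m).filter (fun i => decide ((i : Int) ∈ pp)))) := by
  intro m
  induction m with
  | zero =>
    intro a cdrs run _
    by_cases h0 : run = []
    · simp [pvAFlush, pvRuns, pvBig, h0]
    · by_cases h3 : 3 ≤ run.length <;>
        simp [pvAFlush, pvRuns, pvBig, h0, h3]
  | succ m ih =>
    intro a cdrs run h
    rw [List.range'_succ]
    simp only [List.foldl_cons, List.filter_cons]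
    by_cases hmem : (a : Int) ∈ pp
    · have hd : decide ((a : Int) ∈ pp) = true := by simpa using hmem
      rw [hd, if_pos rfl]
      have hstep : pvAStep ds pp (cdrs, run) a = (cdrs, run ++ [a]) := by
        simp [pvAStep, hmem]
      rw [hstep]
      have hrw : pvRuns run (a :: (List.range' (a + 1) m).filter (fun i => decide ((i : Int) ∈ pp)))
          = pvRuns (run ++ [a]) ((List.range' (a + 1) m).filter (fun i => decide ((i : Int) ∈ pp))) := by
        by_cases h0 : run = []
        · subst h0; simp [pvRuns]
        · simp only [pvRuns]
          rw [if_pos ⟨h0, (h h0).symm⟩]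
      rw [hrw]
      exact ih (a + 1) cdrs (run ++ [a]) (fun _ => by rw [List.getLastD_concat])
    · have hd : decide ((a : Int) ∈ pp) = false := by simpa using hmem
      rw [hd]
      simp only [Bool.false_eq_true, if_false]
      by_cases h0 : run = []
      · have hstep : pvAStep ds pp (cdrs, run) a = (cdrs, run) := by
          simp [pvAStep, hmem, h0]
        rw [hstep, ih (a + 1) cdrs run (fun hx => absurd h0 hx)]
      · have hstep : pvAStep ds pp (cdrs, run) a
            = ((if 3 ≤ run.length then cdrs ++ [pvMkTriple ds run] else cdrs), []) := by
          simp [pvAStep, hmem, h0]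
        rw [hstep, ih (a + 1) _ [] (fun hx => absurd rfl hx)]
        have hbreak : pvRuns run ((List.range' (a + 1) m).filter (fun i => decide ((i : Int) ∈ pp)))
            = run :: pvRuns [] ((List.range' (a + 1) m).filter (fun i => decide ((i : Int) ∈ pp))) := by
          apply pvRuns_break run _ h0
          intro q hq
          have hq' : a + 1 ≤ q := by
            have := List.mem_range'_1.mp (List.mem_of_mem_filter hq)
            omega
          rw [h h0]; omega
        rw [hbreak]
        by_cases h3 : 3 ≤ run.length <;>
          simp [pvBig, h3]

lemma pvPositions_eq (pp : List Int) (n : Nat) :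
    PySem.List.sorted
        (PySem.Set.ofList (pp.filter (fun p => decide (0 ≤ p) && decide (p < (n : Int)))))
        (fun x => x) false
      = ((List.range n).filter (fun (i : Nat) => decide ((i : Int) ∈ pp))).map (fun i : Nat => (i : Int)) := by
  have hnd : (((List.range n).filter (fun (i : Nat) => decide ((i : Int) ∈ pp))).map (fun i : Nat => (i : Int))).Nodup :=
    ((List.nodup_range).filter _).map (fun a b hab => by exact_mod_cast hab)
  apply PySem.List.sorted_eq_of_perm_of_pairwise_lt
  · rw [List.perm_ext_iff_of_nodup hnd (PySem.Set.nodup_ofList _)]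
    intro x
    simp only [PySem.Set.mem_ofList, List.mem_filter, List.mem_map, List.mem_range,
      decide_eq_true_eq, Bool.and_eq_true]
    constructor
    · rintro ⟨i, ⟨hi, hpp⟩, rfl⟩
      exact ⟨hpp, by omega, by exact_mod_cast hi⟩
    · rintro ⟨hpp, hx0, hxn⟩
      refine ⟨x.toNat, ⟨by omega, ?_⟩, by omega⟩
      rw [Int.toNat_of_nonneg hx0]; exact hpp
  · exact ((List.pairwise_lt_range).filter _).map _ (fun a b hab => by exact_mod_cast hab)

lemma pvFinish_eq (cdrs : List (Nat × Nat × String)) :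
    pvAFinish cdrs = pvBFinish (cdrs.map (fun t => t.2.2)) := by
  match cdrs with
  | [] => rfl
  | [a] => rfl
  | [a, b] => rfl
  | a :: b :: c :: rest =>
    have hA : pvAFinish (a :: b :: c :: rest) = [("CDR1", a.2.2), ("CDR2", b.2.2), ("CDR3", c.2.2)] := rfl
    rw [hA]
    simp [pvBFinish, PySem.List.enumerate, PySem.List.pyGetD, PySem.List.pyGet?, PySem.List.pyIdx?]
    refine ⟨?_, ?_, ?_⟩ <;> split_ifs with hh <;> simp_all <;> omega

lemma pvHeadD_map_cast (l : List Nat) :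
    (l.map (fun i : Nat => (i : Int))).headD 0 = ((l.headD 0 : Nat) : Int) := by
  cases l <;> simp

-- ===== VERDICT (by name: the statement is the Claim_ definition above) =====
theorem extract_cdr_like_regions_spec : Claim_equal_extract_cdr_like_regions := by
  intro ds pp _
  unfold Spec_extract_cdr_like_regions
  show pvAFinish (pvAFlush ds ((List.range ds.toList.length).foldl (pvAStep ds pp) ([], [])))
      = extract_cdr_like_regions_alt ds pp
  unfold extract_cdr_like_regions_alt
  simp only [pvPositions_eq pp ds.toList.length]
  show pvAFinish (pvAFlush ds ((List.range ds.toList.length).foldl (pvAStep ds pp) ([], [])))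
      = pvBFinish (((pvBFlush ((((List.range ds.toList.length).filter
            (fun (i : Nat) => decide ((i : Int) ∈ pp))).map (fun i : Nat => (i : Int))).foldl
            pvBStep ([], []))).filter (fun r => 3 ≤ r.length)).map
          (fun r => PySem.Str.slice ds (some (r.headD 0)) (some (r.getLastD 0 + 1))))
  rw [pvBLoop _ [] [], List.range_eq_range',
      pvALoop ds pp _ 0 [] [] (fun hx => absurd rfl hx), ← List.range_eq_range']
  simp only [List.nil_append]
  have hcast : pvRuns ([] : List Int)
        ((((List.range ds.toList.length).filter (fun (i : Nat) => decide ((i : Int) ∈ pp))).map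
          (fun i : Nat => (i : Int))))
      = (pvRuns ([] : List Nat)
          ((List.range ds.toList.length).filter (fun (i : Nat) => decide ((i : Int) ∈ pp)))).map
          (List.map (fun i : Nat => (i : Int))) := by
    simpa using pvRuns_cast _ []
  rw [hcast, pvFinish_eq, List.filter_map, List.map_map]
  unfold pvBig
  rw [List.map_map]
  have hfil : ((pvRuns ([] : List Nat)
        ((List.range ds.toList.length).filter (fun (i : Nat) => decide ((i : Int) ∈ pp)))).filter
          ((fun r => decide (3 ≤ r.length)) ∘ List.map (fun i : Nat => (i : Int))))
      = ((pvRuns ([] : List Nat)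
        ((List.range ds.toList.length).filter (fun (i : Nat) => decide ((i : Int) ∈ pp)))).filter
          (fun r => decide (3 ≤ r.length))) := by
    apply List.filter_congr
    intro r _
    simp
  rw [hfil]
  apply congrArg pvBFinish
  apply List.map_congr_left
  intro r _
  simp only [Function.comp_apply, pvMkTriple, pvHeadD_map_cast, pvGetLastD_map_cast]
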